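-- pv_equiv track=rewrite | github.com/Lincyaw/AgentM | src/agentm/agents/node/worker.py | _format_tool_tips
-- ===== SOURCE A (Python) =====
-- from typing import Any, Literal, cast
--
-- def _format_tool_tips(tips: list[dict[str, Any]]) -> str:
--     """Format cross-worker error tips as a markdown section."""
--     if not tips:
--         return ""
--     by_tool: dict[str, list[dict]] = {}
--     for tip in tips:
--         by_tool.setdefault(tip.get("tool_name", "unknown"), []).append(tip)
--
--     lines = ["## Tool Usage Tips (from prior sub-agents)", ""]
--     for tool_name, tool_tips in sorted(by_tool.items()):
--         lines.append(f"### `{tool_name}`")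
--         for tip in tool_tips[-5:]:  # cap at 5 per tool
--             args = tip.get("args_summary", "")
--             error = tip.get("error", "")
--             lines.append(f"- Error with args {{{args}}}: {error}")
--         lines.append("")
--     return "\n".join(lines)
-- ===== SOURCE B (Python) =====
-- def _group(tips: list) -> list:
--     """Partition tips into (name, fiber) pairs by recursive fiber extraction."""
--     if not tips:
--         return []
--     name = tips[0].get("tool_name", "unknown")
--     same = [t for t in tips if t.get("tool_name", "unknown") == name]
--     rest = [t for t in tips if t.get("tool_name", "unknown") != name]
--     return [(name, same)] + _group(rest)
--
--
-- def _section(name: str, group: list) -> str: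
--     entries = [f"- Error with args {{{t.get('args_summary', '')}}}: {t.get('error', '')}"
--                for t in group[-5:]]  # cap at 5 per tool
--     return "\n".join([f"### `{name}`"] + entries + [""])
--
--
-- def _format_tool_tips(tips: list) -> str:
--     """Format cross-worker error tips as a markdown section."""
--     if not tips:
--         return ""
--     sections = [_section(name, group)
--                 for name, group in sorted(_group(tips), key=lambda g: g[0])]
--     return "\n".join(["## Tool Usage Tips (from prior sub-agents)", ""] + sections)
-- ===== Notes on version B (the rewrite author's own statement) =====
-- stated objective: alternative
-- what changed: Replaces the setdefault-into-dict accumulation with nested line-appending loops by a recursive fiber partition (peel off the first tip's tool with its whole group, recurse on the remainder), then sorting the (name, group) pairs and mapping each to a section string joined at the end.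
import Mathlib
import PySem

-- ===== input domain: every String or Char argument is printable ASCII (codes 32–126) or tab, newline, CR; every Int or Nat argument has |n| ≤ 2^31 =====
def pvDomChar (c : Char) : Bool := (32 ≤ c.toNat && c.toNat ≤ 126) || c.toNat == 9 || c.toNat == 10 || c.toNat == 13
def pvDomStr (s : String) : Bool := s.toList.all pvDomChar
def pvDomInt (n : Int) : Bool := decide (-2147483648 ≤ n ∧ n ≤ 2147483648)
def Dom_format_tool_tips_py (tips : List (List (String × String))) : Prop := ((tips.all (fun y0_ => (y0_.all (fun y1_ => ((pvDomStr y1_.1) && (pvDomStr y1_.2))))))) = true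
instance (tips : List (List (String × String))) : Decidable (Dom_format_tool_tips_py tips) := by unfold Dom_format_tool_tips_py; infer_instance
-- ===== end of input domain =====

-- B replaces A's setdefault-dict accumulation + nested line-appending loops by a recursive
-- fiber partition (extract the first tool's group, recurse on the rest), a sort of the
-- (name, group) pairs, and per-group section strings joined at the end (objective: alternative).

-- tip.get(k, dflt) on a dict modelled as an association list (first match).
def tipGet (t : List (String × String)) (k dflt : String) : String :=
  (PySem.Dict.mk t).getD k dflt

-- ===== PORT A =====
def format_tool_tips_py (tips : List (List (String × String))) : String :=
  if tips = [] then "" else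
  let by_tool : PySem.Dict String (List (List (String × String))) :=
    tips.foldl (fun d tip =>
      d.modify (tipGet tip "tool_name" "unknown") [] (fun v => v ++ [tip]))
      PySem.Dict.empty
  let lines : List String := ["## Tool Usage Tips (from prior sub-agents)", ""]
  let lines :=
    (PySem.List.sorted by_tool.items (fun p => p.1)).foldl (fun acc p =>
      let acc := acc ++ ["### `" ++ p.1 ++ "`"]
      let acc := (PySem.List.slice p.2 (some (-5)) none).foldl (fun acc tip =>
        let args := tipGet tip "args_summary" ""
        let error := tipGet tip "error" ""
        acc ++ ["- Error with args {" ++ args ++ "}: " ++ error]) acc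
      acc ++ [""]) lines
  PySem.Str.join "\n" lines

-- ===== PORT B =====
-- _group: recursively peel off the first tip's tool name with its whole fiber.
def groupB : List (List (String × String)) → List (String × List (List (String × String)))
  | [] => []
  | t :: ts =>
    let name := tipGet t "tool_name" "unknown"
    let same := (t :: ts).filter (fun x => tipGet x "tool_name" "unknown" == name)
    let rest := (t :: ts).filter (fun x => !(tipGet x "tool_name" "unknown" == name))
    (name, same) :: groupB rest
  termination_by tips => tips.length
  decreasing_by
    simp only [List.filter_cons, beq_self_eq_true, Bool.not_true, List.length_cons]
    exact Nat.lt_succ_of_le (List.length_filter_le _ _)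

-- _section: one markdown section for one tool.
def sectionB (name : String) (group : List (List (String × String))) : String :=
  let entries := (PySem.List.slice group (some (-5)) none).map  -- cap at 5 per tool
    (fun t => "- Error with args {" ++ tipGet t "args_summary" "" ++ "}: " ++ tipGet t "error" "")
  PySem.Str.join "\n" (["### `" ++ name ++ "`"] ++ entries ++ [""])

def format_tool_tips_py_alt (tips : List (List (String × String))) : String :=
  if tips = [] then "" else
  let sections := (PySem.List.sorted (groupB tips) (fun g => g.1)).map
    (fun g => sectionB g.1 g.2)
  PySem.Str.join "\n" (["## Tool Usage Tips (from prior sub-agents)", ""] ++ sections)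

-- ===== PRECONDITION & SPEC =====
def Spec_format_tool_tips_py (tips : List (List (String × String))) (out : String) : Prop := out = format_tool_tips_py_alt tips
instance (tips : List (List (String × String))) (out : String) : Decidable (Spec_format_tool_tips_py tips out) := by unfold Spec_format_tool_tips_py; infer_instance

-- ===== CLAIM (what is proved, stated in full; the proofs are below) =====
def Claim_equal_format_tool_tips_py : Prop := ∀ (tips : List (List (String × String))), Dom_format_tool_tips_py tips → Spec_format_tool_tips_py tips (format_tool_tips_py tips)

-- ===== LEMMAS AND PROOFS =====

-- the tool key of a tip
def tipKey (tip : List (String × String)) : String := tipGet tip "tool_name" "unknown"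

-- the lines of one tool's section
def gLines (p : String × List (List (String × String))) : List String :=
  ["### `" ++ p.1 ++ "`"]
    ++ (PySem.List.slice p.2 (some (-5)) none).map
        (fun t => "- Error with args {" ++ tipGet t "args_summary" "" ++ "}: " ++ tipGet t "error" "")
    ++ [""]

-- A's accumulated dict, characterised: its items are the distinct keys (first-insertion
-- order) paired with the sublist of tips carrying that key, in input order.
theorem items_by_tool (tips : List (List (String × String))) :
    (tips.foldl (fun d tip =>
        d.modify (tipKey tip) [] (fun v => v ++ [tip])) PySem.Dict.empty).items
      = (PySem.Set.ofList (tips.map tipKey)).map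
          (fun n => (n, tips.filter (fun t => tipKey t == n))) := by
  set D := tips.foldl (fun d tip =>
      d.modify (tipKey tip) [] (fun v => v ++ [tip])) PySem.Dict.empty with hD
  have hkeys : D.keys = PySem.Set.ofList (tips.map tipKey) := by
    rw [hD, PySem.Dict.keys_foldl_modify_key tips tipKey [] (fun _ tip v => v ++ [tip]),
        PySem.Dict.keys_empty, PySem.Set.update_nil_left]
  have hget : ∀ c, D.getD c [] = tips.filter (fun t => tipKey t == c) := by
    intro c
    have h := PySem.Dict.getD_foldl_modify_append
      (tips.map (fun t => (tipKey t, t))) PySem.Dict.empty c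
    rw [List.foldl_map, List.filter_map] at h
    simpa [hD, List.map_map, Function.comp_def] using h
  have hnd : D.keys.Nodup := hkeys ▸ PySem.Set.nodup_ofList _
  rw [PySem.Dict.items_eq_map_keys D hnd [], hkeys]
  exact List.map_congr_left (fun n _ => by rw [hget n])

-- first-occurrence dedup commutes with filtering
theorem ofList_filter (p : String → Bool) (xs : List String) :
    PySem.Set.ofList (xs.filter p) = (PySem.Set.ofList xs).filter p := by
  induction xs with
  | nil => rfl
  | cons x xs ih =>
    rw [PySem.Set.ofList_cons, List.filter_cons]
    cases hpx : p x with
    | true =>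
      rw [List.filter_cons, hpx, if_pos rfl, PySem.Set.ofList_cons, ih]
      show _ :: List.filter _ (List.filter _ _) = _ :: List.filter _ (List.filter _ _)
      rw [List.filter_filter, List.filter_filter]
      exact congrArg _ (List.filter_congr (fun y _ => by rw [Bool.and_comm]))
    | false =>
      rw [List.filter_cons, hpx, if_neg (by simp), ih]
      show List.filter p _ = List.filter p (List.filter _ _)
      rw [List.filter_filter]
      exact List.filter_congr (fun y _ => by
        by_cases hyx : y = x
        · subst hyx; simp [hpx]
        · simp [hyx])

-- B's recursive partition, characterised the same way as A's dict items
theorem groupB_eq (tips : List (List (String × String))) :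
    groupB tips
      = (PySem.Set.ofList (tips.map tipKey)).map
          (fun n => (n, tips.filter (fun t => tipKey t == n))) := by
  induction hn : tips.length using Nat.strong_induction_on generalizing tips with
  | _ n ih =>
  cases tips with
  | nil => simp [groupB]
  | cons t ts =>
    simp only [groupB]
    have hrest : List.filter (fun x => !(tipGet x "tool_name" "unknown" == tipGet t "tool_name" "unknown")) (t :: ts)
        = ts.filter (fun x => !(tipKey x == tipKey t)) := by
      simp [tipKey]
    rw [hrest]
    have hlen : (ts.filter (fun x => !(tipKey x == tipKey t))).length < n := by
      subst hn
      exact Nat.lt_succ_of_le (List.length_filter_le _ _)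
    rw [ih _ hlen _ rfl]
    -- rewrite the dedup of the whole key list
    have hkeys : PySem.Set.ofList ((t :: ts).map tipKey)
        = tipKey t :: PySem.Set.ofList ((ts.filter (fun x => !(tipKey x == tipKey t))).map tipKey) := by
      rw [List.map_cons, PySem.Set.ofList_cons]
      congr 1
      have hcomm : (ts.filter (fun x => !(tipKey x == tipKey t))).map tipKey
          = (ts.map tipKey).filter (fun nm => !(nm == tipKey t)) := by
        rw [List.filter_map]
        simp [Function.comp_def]
      rw [hcomm, ofList_filter]
      rfl
    rw [hkeys, List.map_cons]
    refine congrArg₂ (· :: ·) rfl (List.map_congr_left fun nm hnm => ?_)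
    have hne : nm ≠ tipKey t := by
      have hnm' : nm ∈ (ts.filter (fun x => !(tipKey x == tipKey t))).map tipKey := by
        simpa [pysem] using hnm
      rcases List.mem_map.mp hnm' with ⟨x, hx, rfl⟩
      simpa using (List.mem_filter.mp hx).2
    show (nm, List.filter (fun tp => tipKey tp == nm)
            (List.filter (fun x => !(tipKey x == tipKey t)) ts))
        = (nm, List.filter (fun tp => tipKey tp == nm) (t :: ts))
    have h1 : List.filter (fun tp => tipKey tp == nm) (t :: ts)
        = ts.filter (fun tp => tipKey tp == nm) := by
      rw [List.filter_cons, if_neg (by simpa using Ne.symm hne)]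
    have h2 : List.filter (fun tp => tipKey tp == nm)
          (List.filter (fun x => !(tipKey x == tipKey t)) ts)
        = ts.filter (fun tp => tipKey tp == nm) := by
      rw [List.filter_filter]
      apply List.filter_congr
      intro y _
      by_cases hy : tipKey y = nm
      · simpa [hy] using hne
      · simp [hy]
    rw [h1, h2]

-- join over a nonempty prefix followed by a cons
theorem join_append_cons (sep : List Char) (p : List (List Char)) (hp : p ≠ []) (z : List Char) (zs : List (List Char)) :
    PySem.Chars.join sep (p ++ z :: zs)
      = PySem.Chars.join sep p ++ sep ++ PySem.Chars.join sep (z :: zs) := by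
  induction p with
  | nil => exact absurd rfl hp
  | cons a p' ih =>
    cases p' with
    | nil => rw [List.cons_append, List.nil_append, PySem.Chars.join_cons_cons, PySem.Chars.join_singleton]
    | cons b p'' =>
      rw [List.cons_append, List.cons_append, PySem.Chars.join_cons_cons,
          ← List.cons_append, ih (by simp), PySem.Chars.join_cons_cons]
      simp [List.append_assoc]

-- inline one already-joined piece into a surrounding join
theorem join_inline (sep : List Char) (xs : List (List Char)) (hxs : xs ≠ [])
    (p : List (List Char)) (hp : p ≠ []) (zs : List (List Char)) :
    PySem.Chars.join sep (xs ++ PySem.Chars.join sep p :: zs)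
      = PySem.Chars.join sep ((xs ++ p) ++ zs) := by
  rcases List.exists_cons_of_ne_nil hp with ⟨c, q, rfl⟩
  cases zs with
  | nil =>
    rw [join_append_cons sep xs hxs, PySem.Chars.join_singleton, List.append_nil,
        join_append_cons sep xs hxs]
  | cons z zs' =>
    rw [join_append_cons sep xs hxs, PySem.Chars.join_cons_cons,
        join_append_cons sep (xs ++ c :: q) (by simp), join_append_cons sep xs hxs]
    simp [List.append_assoc]

-- joining per-piece joined strings = joining the flattened pieces
theorem join_flat (sep : List Char) (pieces : List (List (List Char))) (xs : List (List Char))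
    (hxs : xs ≠ []) (h : ∀ p ∈ pieces, p ≠ []) :
    PySem.Chars.join sep (xs ++ pieces.map (PySem.Chars.join sep))
      = PySem.Chars.join sep (xs ++ pieces.flatten) := by
  induction pieces generalizing xs with
  | nil => rfl
  | cons p ps ih =>
    rw [List.map_cons, join_inline sep xs hxs p (h p (by simp)),
        List.flatten_cons, ← List.append_assoc]
    exact ih (xs ++ p) (by simp [hxs]) (fun q hq => h q (by simp [hq]))

theorem format_tool_tips_eq (tips : List (List (String × String))) :
    format_tool_tips_py tips = format_tool_tips_py_alt tips := by
  by_cases h : tips = []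
  · simp [format_tool_tips_py, format_tool_tips_py_alt, h]
  · unfold format_tool_tips_py format_tool_tips_py_alt
    simp only [h, ite_false]
    have hA := items_by_tool tips
    unfold tipKey at hA
    have hB := groupB_eq tips
    unfold tipKey at hB
    rw [hA, hB]
    set M := PySem.List.sorted
      ((PySem.Set.ofList (tips.map (fun tip => tipGet tip "tool_name" "unknown"))).map
        (fun n => (n, tips.filter (fun t => tipGet t "tool_name" "unknown" == n))))
      (fun p => p.1) with hM
    have h1 : M.foldl (fun acc p =>
        ((PySem.List.slice p.2 (some (-5)) none).foldl (fun acc tip =>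
          acc ++ ["- Error with args {" ++ tipGet tip "args_summary" "" ++ "}: "
            ++ tipGet tip "error" ""])
          (acc ++ ["### `" ++ p.1 ++ "`"])) ++ [""])
        ["## Tool Usage Tips (from prior sub-agents)", ""]
      = ["## Tool Usage Tips (from prior sub-agents)", ""] ++ M.flatMap gLines := by
      rw [PySem.List.foldl_congr_mem M _ (fun acc p => acc ++ gLines p) _
        (fun acc p _ => by
          rw [PySem.List.foldl_append_singleton_eq_map]
          simp [gLines, List.append_assoc]),
        PySem.List.foldl_append_eq_flatMap]
    rw [h1]
    have hsec : ∀ g : String × List (List (String × String)),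
        sectionB g.1 g.2 = PySem.Str.join "\n" (gLines g) := fun g => rfl
    rw [← String.toList_inj, PySem.Str.toList_join, PySem.Str.toList_join,
        List.map_append, List.map_append]
    have hmapB : (M.map (fun g => sectionB g.1 g.2)).map String.toList
        = (M.map (fun g => (gLines g).map String.toList)).map (PySem.Chars.join "\n".toList) := by
      rw [List.map_map, List.map_map]
      exact List.map_congr_left (fun g _ => by
        rw [Function.comp_apply, Function.comp_apply, hsec g, PySem.Str.toList_join])
    have hmapA : (M.flatMap gLines).map String.toList
        = (M.map (fun g => (gLines g).map String.toList)).flatten := by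
      rw [List.map_flatMap, List.flatMap_def]
    rw [hmapB, hmapA]
    exact (join_flat "\n".toList (M.map (fun g => (gLines g).map String.toList))
      (["## Tool Usage Tips (from prior sub-agents)", ""].map String.toList)
      (by simp) (fun p hp => by
        rcases List.mem_map.mp hp with ⟨g, _, rfl⟩
        simp [gLines])).symm

-- ===== VERDICT (by name: the statement is the Claim_ definition above) =====
theorem format_tool_tips_py_spec : Claim_equal_format_tool_tips_py := by
  intro tips _
  exact format_tool_tips_eq tips
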